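-- pv_equiv track=rewrite | github.com/Kaluza05/Studia | zimowy24-25/wstep do pythona/lista10/z6.py | gram_2
-- ===== SOURCE A (Python) =====
-- def gram_2(words):
--     m = []
--     for word in words:
--         tokens = [token for token in word]
--         n_grams = zip(*[tokens[i:] for i in range(3)])
--         n_grams = [''.join(i) for i in n_grams]
--         m += n_grams
--     return m
-- ===== SOURCE B (Python) =====
-- def gram_2(words):
--     m = []
--     for word in words:
--         w = word
--         while len(w) >= 3:
--             m.append(w[:3])
--             w = w[1:]
--     return m
-- ===== Notes on version B (the rewrite author's own statement) =====
-- stated objective: simpler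
-- what changed: Replaces the zip-of-three-offset-slices idiom (which materialises a token list, three shifted copies and tuple triples) with a sliding-window while loop slicing the first three characters directly.
import Mathlib
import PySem

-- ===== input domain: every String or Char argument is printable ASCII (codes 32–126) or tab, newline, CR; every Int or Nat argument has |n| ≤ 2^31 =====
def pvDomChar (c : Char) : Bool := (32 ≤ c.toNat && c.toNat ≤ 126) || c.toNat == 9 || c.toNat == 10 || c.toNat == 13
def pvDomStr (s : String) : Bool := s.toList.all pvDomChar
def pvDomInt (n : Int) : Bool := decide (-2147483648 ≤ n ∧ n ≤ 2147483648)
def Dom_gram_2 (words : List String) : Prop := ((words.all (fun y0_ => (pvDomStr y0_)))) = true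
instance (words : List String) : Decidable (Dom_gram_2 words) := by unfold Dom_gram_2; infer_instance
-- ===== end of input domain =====

-- B replaces A's zip-of-three-offset-slices with a sliding-window loop (simpler decomposition, same cost).

-- ===== PORT A =====
-- zip(*[tokens[i:] for i in range(3)]) pairs each char with the next two; ''.join over the triple.
def gram_2 (words : List String) : List String :=
  words.foldl (fun m word =>
    let tokens := word.toList
    let n_grams := (tokens.zip (tokens.drop 1)).zip (tokens.drop 2)
    m ++ n_grams.map (fun p => String.mk [p.1.1, p.1.2, p.2])) []

-- ===== PORT B =====
-- while len(w) >= 3: m.append(w[:3]); w = w[1:]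
def gram2AltLoop (m : List String) (w : List Char) : List String :=
  if w.length ≥ 3 then gram2AltLoop (m ++ [String.mk (w.take 3)]) (w.drop 1) else m
termination_by w.length
decreasing_by simp; omega

def gram_2_alt (words : List String) : List String :=
  words.foldl (fun m word => gram2AltLoop m word.toList) []

-- ===== PRECONDITION & SPEC =====
def Spec_gram_2 (words : List String) (out : List String) : Prop := out = gram_2_alt words
instance (words : List String) (out : List String) : Decidable (Spec_gram_2 words out) := by unfold Spec_gram_2; infer_instance

-- ===== CLAIM (what is proved, stated in full; the proofs are below) =====
def Claim_equal_gram_2 : Prop := ∀ (words : List String), Dom_gram_2 words → Spec_gram_2 words (gram_2 words)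

-- ===== LEMMAS AND PROOFS =====
-- A's per-word gram list, as written in the port of A.
def gramsOf (l : List Char) : List String :=
  ((l.zip (l.drop 1)).zip (l.drop 2)).map (fun p => String.mk [p.1.1, p.1.2, p.2])

theorem gram2AltLoop_eq (l : List Char) : ∀ (m : List String), gram2AltLoop m l = m ++ gramsOf l := by
  induction l with
  | nil => intro m; rw [gram2AltLoop]; simp [gramsOf]
  | cons a tl ih =>
    intro m
    match tl with
    | [] => rw [gram2AltLoop]; simp [gramsOf]
    | [b] => rw [gram2AltLoop]; simp [gramsOf]
    | b :: c :: rest =>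
      rw [gram2AltLoop]
      simp only [List.length_cons, List.take, List.drop]
      rw [if_pos (by omega)]
      rw [ih]
      simp [gramsOf]

theorem foldl_eq (words : List String) : ∀ (m : List String),
    words.foldl (fun m word => gram2AltLoop m word.toList) m
      = words.foldl (fun m word =>
          let tokens := word.toList
          let n_grams := (tokens.zip (tokens.drop 1)).zip (tokens.drop 2)
          m ++ n_grams.map (fun p => String.mk [p.1.1, p.1.2, p.2])) m := by
  induction words with
  | nil => intro m; rfl
  | cons w ws ih =>
    intro m
    simp only [List.foldl]
    rw [gram2AltLoop_eq]
    exact ih _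

-- ===== VERDICT (by name: the statement is the Claim_ definition above) =====
theorem gram_2_spec : Claim_equal_gram_2 := by
  intro words _
  unfold Spec_gram_2 gram_2 gram_2_alt
  rw [foldl_eq]
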